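-- pv_equiv track=rewrite | github.com/chingsley/6314_ml_project_sample_collection | EnergySmells_Verified/ExtraUsageOfArrays/gold/count_binary_pair_removals/smelly_count_binary_pair_removals.py | count_binary_pair_removals
-- ===== SOURCE A (Python) =====
-- def count_binary_pair_removals(N):
--     A = []
--     for i in N:
--         A.append(i)
--
--     cnt = 0
--     j = 0
--
--     while len(A) >= 2 and len(A) - 1 > j:
--         if A[j] != A[j + 1]:
--             cnt = cnt + 2
--             del A[j]
--             del A[j]
--             if j != 0:
--                 j -= 1
--         else:
--
--             j += 1
--
--     return cnt
-- ===== SOURCE B (Python) =====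
-- def count_binary_pair_removals(N):
--     stack = []
--     cnt = 0
--     for x in N:
--         if stack and stack[-1] != x:
--             stack.pop()
--             cnt += 2
--         else:
--             stack.append(x)
--     return cnt
-- ===== Notes on version B (the rewrite author's own statement) =====
-- stated objective: faster
-- what changed: Replaced the quadratic delete-in-place scan with back-pointer by a single-pass stack: pop and count 2 when the current element differs from the stack top, otherwise push.
import Mathlib
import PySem

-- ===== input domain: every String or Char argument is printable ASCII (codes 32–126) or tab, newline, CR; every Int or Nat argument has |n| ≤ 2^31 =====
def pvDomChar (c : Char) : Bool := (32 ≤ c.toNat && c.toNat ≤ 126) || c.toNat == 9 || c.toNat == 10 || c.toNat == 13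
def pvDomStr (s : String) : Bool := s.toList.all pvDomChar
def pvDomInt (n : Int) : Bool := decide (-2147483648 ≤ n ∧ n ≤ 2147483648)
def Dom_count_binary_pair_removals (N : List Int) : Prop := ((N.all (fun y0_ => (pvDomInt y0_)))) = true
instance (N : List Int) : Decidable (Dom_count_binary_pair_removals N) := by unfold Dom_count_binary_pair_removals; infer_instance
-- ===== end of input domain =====

-- B replaces A's quadratic delete-in-place scan by a single linear stack pass (faster: asymptotic).

-- ===== PORT A =====
-- A's while loop: state is the list A, index j (Python's j is a non-negative int,
-- decremented only when j != 0, so Nat is exact), and the counter cnt.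
-- `del A[j]; del A[j]` is A.take j ++ A.drop (j+2); A[j], A[j+1] are read via A.drop j
-- (both always in range under the loop condition, so no IndexError arises).
def pvLoopA (A : List Int) (j : Nat) (cnt : Int) : Int :=
  if h : 2 ≤ A.length ∧ j + 1 < A.length then
    match A.drop j with
    | a :: b :: _ =>
      if a ≠ b then
        pvLoopA (A.take j ++ A.drop (j + 2)) (if j = 0 then 0 else j - 1) (cnt + 2)
      else
        pvLoopA A (j + 1) cnt
    | _ => cnt
  else cnt
termination_by 2 * A.length + 1 - j
decreasing_by
  all_goals obtain ⟨h1, h2⟩ := h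
  · simp only [List.length_append, List.length_take, List.length_drop]
    split <;> omega
  · omega

def count_binary_pair_removals (N : List Int) : Int :=
  pvLoopA N 0 0

-- ===== PORT B =====
-- one fold step of Source B's for-loop; the stack is kept top-first
def pvStepB (st : List Int × Int) (x : Int) : List Int × Int :=
  match st with
  | ([], c) => ([x], c)
  | (t :: rest, c) => if t ≠ x then (rest, c + 2) else (x :: t :: rest, c)

def count_binary_pair_removals_alt (N : List Int) : Int :=
  (N.foldl pvStepB ([], 0)).2

-- ===== PRECONDITION & SPEC =====
def Spec_count_binary_pair_removals (N : List Int) (out : Int) : Prop := out = count_binary_pair_removals_alt N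
instance (N : List Int) (out : Int) : Decidable (Spec_count_binary_pair_removals N out) := by unfold Spec_count_binary_pair_removals; infer_instance

-- ===== CLAIM (what is proved, stated in full; the proofs are below) =====
def Claim_equal_count_binary_pair_removals : Prop := ∀ (N : List Int), Dom_count_binary_pair_removals N → Spec_count_binary_pair_removals N (count_binary_pair_removals N)

-- ===== LEMMAS AND PROOFS =====

lemma pvLoopA_stop (A : List Int) (j : Nat) (cnt : Int)
    (h : ¬ (2 ≤ A.length ∧ j + 1 < A.length)) : pvLoopA A j cnt = cnt := by
  rw [pvLoopA]; simp [h]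

lemma pvLoopA_step (A : List Int) (j : Nat) (cnt : Int) (a b : Int) (tl : List Int)
    (h : 2 ≤ A.length ∧ j + 1 < A.length) (hd : A.drop j = a :: b :: tl) :
    pvLoopA A j cnt =
      if a ≠ b then
        pvLoopA (A.take j ++ A.drop (j + 2)) (if j = 0 then 0 else j - 1) (cnt + 2)
      else pvLoopA A (j + 1) cnt := by
  rw [pvLoopA]
  simp [h, hd]

-- loop correspondence: A's state (S.reverse ++ R, |S|-1) matches B's fold with stack S over R
lemma pvLoop_eq (n : Nat) : ∀ (S R : List Int) (cnt : Int),
    S.length + 2 * R.length ≤ n →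
    pvLoopA (S.reverse ++ R) (S.length - 1) cnt = (List.foldl pvStepB (S, cnt) R).2 := by
  induction n with
  | zero =>
    intro S R cnt hle
    have hS : S = [] := by cases S <;> simp at hle ⊢
    have hR : R = [] := by cases R <;> simp [hS] at hle ⊢
    subst hS; subst hR
    simp [pvLoopA_stop, List.foldl]
  | succ n ih =>
    intro S R cnt hle
    cases R with
    | nil =>
      simp only [List.append_nil, List.foldl_nil]
      exact pvLoopA_stop _ _ _ (by simp only [List.length_reverse]; omega)
    | cons x R' =>
      cases S with
      | nil =>
        -- empty stack: pushing x is the same pvLoopA state with stack [x]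
        have := ih [x] R' cnt (by simp at hle ⊢; omega)
        simpa [List.foldl, pvStepB] using this
      | cons t S' =>
        have hdrop : (List.reverse (t :: S') ++ (x :: R')).drop ((t :: S').length - 1)
            = t :: x :: R' := by
          have : List.reverse (t :: S') ++ (x :: R') = S'.reverse ++ (t :: x :: R') := by
            simp
          rw [this]
          simp
        have hcond : 2 ≤ (List.reverse (t :: S') ++ (x :: R')).length ∧
            (t :: S').length - 1 + 1 < (List.reverse (t :: S') ++ (x :: R')).length := by
          simp; omega
        rw [pvLoopA_step _ _ _ t x R' hcond hdrop]
        by_cases hne : t = x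
        · -- equal: push
          subst hne
          simp only [ne_eq, not_true_eq_false]
          have harr : List.reverse (t :: S') ++ (t :: R') = List.reverse (t :: t :: S') ++ R' := by
            simp
          have hj : (t :: S').length - 1 + 1 = (t :: t :: S').length - 1 := by simp
          rw [harr, hj, ih (t :: t :: S') R' cnt (by simp at hle ⊢; omega)]
          simp [List.foldl, pvStepB]
        · -- differ: pop, cnt + 2
          rw [if_pos hne]
          have htake : (List.reverse (t :: S') ++ (x :: R')).take ((t :: S').length - 1)
              = S'.reverse := by
            have h1 : List.reverse (t :: S') ++ (x :: R') = S'.reverse ++ (t :: x :: R') := by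
              simp
            rw [h1]
            simp
          have hdrop2 : (List.reverse (t :: S') ++ (x :: R')).drop ((t :: S').length - 1 + 2)
              = R' := by
            have h1 : List.reverse (t :: S') ++ (x :: R')
                = (List.reverse (t :: S') ++ [x]) ++ R' := by simp
            rw [h1]
            have h2 : (t :: S').length - 1 + 2 = (List.reverse (t :: S') ++ [x]).length := by
              simp
            rw [h2, List.drop_left]
          rw [htake, hdrop2]
          have hj : (if (t :: S').length - 1 = 0 then 0 else (t :: S').length - 1 - 1)
              = S'.length - 1 := by
            cases S' <;> simp
          rw [hj, ih S' R' (cnt + 2) (by simp at hle ⊢; omega)]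
          simp [List.foldl, pvStepB, hne]

-- ===== VERDICT (by name: the statement is the Claim_ definition above) =====
theorem count_binary_pair_removals_spec : Claim_equal_count_binary_pair_removals := by
  intro N _
  unfold Spec_count_binary_pair_removals count_binary_pair_removals count_binary_pair_removals_alt
  have := pvLoop_eq (([] : List Int).length + 2 * N.length) [] N 0 (le_refl _)
  simpa using this
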